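-- pv_equiv track=rewrite | github.com/hlcr/Leetcode | design_square.py | convert2pair
-- ===== SOURCE A (Python) =====
-- def measure_min_distance(p1, p2):
--     return abs(p1[0] - p2[0]) + abs(p1[1] - p2[1])
--
-- def convert2pair(num_list, w):
--     result = []
--     for nums in num_list:
--         temp = [(num // w, num % w) for num in nums]
--         flag = True
--         for i in range(len(temp)):
--             if not flag:
--                 break
--             for j in range(i + 1, len(temp)):
--                 m = measure_min_distance(temp[i], temp[j])
--                 if m <= 2:
--                     flag = False
--                     break
--         if flag:
--             result.append(temp)
--     return result
-- ===== SOURCE B (Python) =====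
-- OFFS = [(dx, dy) for dx in range(-2, 3) for dy in range(-2, 3) if abs(dx) + abs(dy) <= 2]
--
-- def convert2pair(num_list, w):
--     result = []
--     for nums in num_list:
--         temp = [(num // w, num % w) for num in nums]
--         seen = set()
--         ok = True
--         for (x, y) in temp:
--             if any((x + dx, y + dy) in seen for (dx, dy) in OFFS):
--                 ok = False
--                 break
--             seen.add((x, y))
--         if ok:
--             result.append(temp)
--     return result
-- ===== Notes on version B (the rewrite author's own statement) =====
-- stated objective: alternative
-- what changed: Replaced the quadratic all-pairs distance scan per list by a single pass that inserts each decoded point into a hash set and probes only the fixed 13-cell Manhattan ball of radius 2 around it (worst-case O(n) per list vs O(n^2), though A's early break makes the two comparable on inputs where a close pair appears early).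
import Mathlib
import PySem

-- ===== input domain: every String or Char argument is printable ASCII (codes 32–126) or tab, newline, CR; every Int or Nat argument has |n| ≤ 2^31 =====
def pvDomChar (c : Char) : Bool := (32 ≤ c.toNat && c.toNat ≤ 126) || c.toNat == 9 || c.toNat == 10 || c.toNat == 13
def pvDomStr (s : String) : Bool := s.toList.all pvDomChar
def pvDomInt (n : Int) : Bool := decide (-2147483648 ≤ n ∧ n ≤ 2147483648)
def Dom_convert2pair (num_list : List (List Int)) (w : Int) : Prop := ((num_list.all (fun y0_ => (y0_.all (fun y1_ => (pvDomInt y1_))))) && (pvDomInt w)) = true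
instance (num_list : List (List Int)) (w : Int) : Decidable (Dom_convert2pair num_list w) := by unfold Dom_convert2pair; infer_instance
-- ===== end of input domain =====

-- B replaces A's quadratic all-pairs distance scan per list by a single pass hashing
-- each decoded point into a set and probing the fixed 13-cell Manhattan neighborhood.

-- ===== PORT A =====
def measureMinDistance (p1 p2 : Int × Int) : Int := |p1.1 - p2.1| + |p1.2 - p2.2|

-- inner loop: for j in range(i+1, len(temp)) with break; js is the remaining index list.
-- temp[j] with j always in range is ported as getD (default never read).
def pvInnerA (temp : List (Int × Int)) (ti : Int × Int) : List Nat → Bool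
  | [] => true
  | j :: js =>
    if measureMinDistance ti (temp.getD j (0, 0)) ≤ 2 then false
    else pvInnerA temp ti js

-- outer loop: for i in range(len(temp)) with 'if not flag: break'.
def pvOuterA (temp : List (Int × Int)) : List Nat → Bool → Bool
  | [], flag => flag
  | i :: is, flag =>
    if flag = false then flag
    else pvOuterA temp is
      (pvInnerA temp (temp.getD i (0, 0)) (List.range' (i + 1) (temp.length - (i + 1))))

def convert2pair (num_list : List (List Int)) (w : Int) : List (List (Int × Int)) :=
  num_list.foldl (fun result nums =>
    let temp := nums.map (fun num => (PySem.Int.floordiv num w, PySem.Int.mod num w))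
    let flag := pvOuterA temp (List.range temp.length) true
    if flag then result ++ [temp] else result) []

-- ===== PORT B =====
-- OFFS = [(dx,dy) for dx in range(-2,3) for dy in range(-2,3) if abs(dx)+abs(dy) <= 2]
def pvOffs : List (Int × Int) :=
  (PySem.List.pyRange (-2) 3 1).flatMap (fun dx =>
    ((PySem.List.pyRange (-2) 3 1).filter (fun dy => |dx| + |dy| ≤ 2)).map (fun dy => (dx, dy)))

-- the single pass with the hash set 'seen' (break ported as returning false)
def pvScanB (seen : PySem.Set (Int × Int)) : List (Int × Int) → Bool
  | [] => true
  | p :: ps =>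
    if pvOffs.any (fun d => PySem.Set.contains seen (p.1 + d.1, p.2 + d.2)) then false
    else pvScanB (PySem.Set.add seen p) ps

def convert2pair_alt (num_list : List (List Int)) (w : Int) : List (List (Int × Int)) :=
  num_list.foldl (fun result nums =>
    let temp := nums.map (fun num => (PySem.Int.floordiv num w, PySem.Int.mod num w))
    let ok := pvScanB PySem.Set.empty temp
    if ok then result ++ [temp] else result) []

-- ===== PRECONDITION & SPEC =====
-- Pre_ excludes only w = 0, on which A raises ZeroDivisionError.
def Pre_convert2pair (num_list : List (List Int)) (w : Int) : Prop := w ≠ 0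
instance (num_list : List (List Int)) (w : Int) : Decidable (Pre_convert2pair num_list w) := by unfold Pre_convert2pair; infer_instance
def pvWitness_convert2pair : List (List Int) × Int := ([[0, 7], [1, 2]], 3)

def Spec_convert2pair (num_list : List (List Int)) (w : Int) (out : List (List (Int × Int))) : Prop := out = convert2pair_alt num_list w
instance (num_list : List (List Int)) (w : Int) (out : List (List (Int × Int))) : Decidable (Spec_convert2pair num_list w out) := by unfold Spec_convert2pair; infer_instance

-- ===== CLAIM (what is proved, stated in full; the proofs are below) =====
def Claim_equal_convert2pair : Prop := ∀ (num_list : List (List Int)) (w : Int), Dom_convert2pair num_list w → Pre_convert2pair num_list w → Spec_convert2pair num_list w (convert2pair num_list w)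

-- ===== LEMMAS AND PROOFS =====

def pvFar (p q : Int × Int) : Prop := 2 < |p.1 - q.1| + |p.2 - q.2|

theorem pvFar_symm {p q : Int × Int} (h : pvFar p q) : pvFar q p := by
  simp only [pvFar] at h ⊢
  rcases abs_cases (p.1 - q.1) with ⟨h1, h2⟩ | ⟨h1, h2⟩ <;>
    rcases abs_cases (p.2 - q.2) with ⟨h3, h4⟩ | ⟨h3, h4⟩ <;>
    rcases abs_cases (q.1 - p.1) with ⟨h5, h6⟩ | ⟨h5, h6⟩ <;>
    rcases abs_cases (q.2 - p.2) with ⟨h7, h8⟩ | ⟨h7, h8⟩ <;> omega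

theorem pvOffs_eq : pvOffs =
    [(-2, 0), (-1, -1), (-1, 0), (-1, 1), (0, -2), (0, -1), (0, 0), (0, 1), (0, 2),
     (1, -1), (1, 0), (1, 1), (2, 0)] := by decide

theorem mem_pvOffs (d : Int × Int) : d ∈ pvOffs ↔ |d.1| + |d.2| ≤ 2 := by
  obtain ⟨a, b⟩ := d
  rw [pvOffs_eq]
  simp only [List.mem_cons, List.not_mem_nil, or_false, Prod.mk.injEq]
  rcases abs_cases a with ⟨h1, h2⟩ | ⟨h1, h2⟩ <;> rcases abs_cases b with ⟨h3, h4⟩ | ⟨h3, h4⟩ <;> omega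

theorem pvScanB_close_iff (s : PySem.Set (Int × Int)) (p : Int × Int) :
    (pvOffs.any (fun d => PySem.Set.contains s (p.1 + d.1, p.2 + d.2))) = true ↔
      ∃ q ∈ s, ¬ pvFar p q := by
  simp only [List.any_eq_true, PySem.Set.contains_iff]
  constructor
  · rintro ⟨d, hd, hm⟩
    rw [mem_pvOffs] at hd
    refine ⟨_, hm, ?_⟩
    simp only [pvFar, not_lt] at hd ⊢
    rcases abs_cases (p.1 - (p.1 + d.1)) with ⟨h1, h2⟩ | ⟨h1, h2⟩ <;>
      rcases abs_cases (p.2 - (p.2 + d.2)) with ⟨h3, h4⟩ | ⟨h3, h4⟩ <;>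
      rcases abs_cases d.1 with ⟨h5, h6⟩ | ⟨h5, h6⟩ <;>
      rcases abs_cases d.2 with ⟨h7, h8⟩ | ⟨h7, h8⟩ <;> omega
  · rintro ⟨q, hq, hf⟩
    refine ⟨(q.1 - p.1, q.2 - p.2), ?_, ?_⟩
    · rw [mem_pvOffs]
      simp only [pvFar, not_lt] at hf ⊢
      rcases abs_cases (p.1 - q.1) with ⟨h1, h2⟩ | ⟨h1, h2⟩ <;>
        rcases abs_cases (p.2 - q.2) with ⟨h3, h4⟩ | ⟨h3, h4⟩ <;>
        rcases abs_cases (q.1 - p.1) with ⟨h5, h6⟩ | ⟨h5, h6⟩ <;>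
        rcases abs_cases (q.2 - p.2) with ⟨h7, h8⟩ | ⟨h7, h8⟩ <;> omega
    · simpa using hq

theorem pvScanB_iff (l : List (Int × Int)) : ∀ (s : PySem.Set (Int × Int)),
    pvScanB s l = true ↔ (l.Pairwise pvFar ∧ ∀ p ∈ l, ∀ q ∈ s, pvFar p q) := by
  induction l with
  | nil => intro s; simp [pvScanB]
  | cons p ps ih =>
    intro s
    simp only [pvScanB]
    split
    · rename_i h
      rw [pvScanB_close_iff] at h
      obtain ⟨q, hq, hf⟩ := h
      simp only [Bool.false_eq_true, false_iff]
      rintro ⟨-, hall⟩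
      exact hf (hall p (by simp) q hq)
    · rename_i h
      rw [pvScanB_close_iff] at h
      push Not at h
      rw [ih]
      constructor
      · rintro ⟨hpw, hall⟩
        refine ⟨List.Pairwise.cons (fun q hq => ?_) hpw, ?_⟩
        · exact pvFar_symm (hall q hq p ((PySem.Set.mem_add _ _ _).mpr (Or.inr rfl)))
        · rintro r hr q hq
          rcases List.mem_cons.mp hr with h1 | h1
          · subst h1; exact h q hq
          · exact hall r h1 q ((PySem.Set.mem_add _ _ _).mpr (Or.inl hq))
      · rintro ⟨hpw, hall⟩
        rcases List.pairwise_cons.mp hpw with ⟨hp, hpw'⟩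
        refine ⟨hpw', ?_⟩
        rintro r hr q hq
        rcases (PySem.Set.mem_add _ _ _).mp hq with h1 | h1
        · exact hall r (List.mem_cons_of_mem _ hr) q h1
        · rw [h1]
          exact pvFar_symm (hp r hr)

theorem pvInnerA_iff (temp : List (Int × Int)) (ti : Int × Int) (js : List Nat) :
    pvInnerA temp ti js = true ↔
      ∀ j ∈ js, ¬ measureMinDistance ti (temp.getD j (0, 0)) ≤ 2 := by
  induction js with
  | nil => simp [pvInnerA]
  | cons j js ih =>
    simp only [pvInnerA]
    split
    · rename_i h; simp only [Bool.false_eq_true, false_iff]; push Not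
      exact ⟨j, by simp, h⟩
    · rename_i h; rw [ih]
      constructor
      · intro hall k hk
        rcases List.mem_cons.mp hk with h1 | h1
        · subst h1; exact h
        · exact hall k h1
      · intro hall k hk; exact hall k (List.mem_cons_of_mem _ hk)

theorem pvOuterA_false (temp : List (Int × Int)) (is : List Nat) :
    pvOuterA temp is false = false := by
  cases is <;> simp [pvOuterA]

theorem pvOuterA_iff (is : List Nat) (temp : List (Int × Int)) :
    pvOuterA temp is true = true ↔
      ∀ i ∈ is, pvInnerA temp (temp.getD i (0, 0))
        (List.range' (i + 1) (temp.length - (i + 1))) = true := by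
  induction is with
  | nil => simp [pvOuterA]
  | cons i is ih =>
    simp only [pvOuterA, if_neg (by simp : ¬ (true = false))]
    by_cases h : pvInnerA temp (temp.getD i (0, 0))
        (List.range' (i + 1) (temp.length - (i + 1))) = true
    · rw [h, ih]
      constructor
      · intro hall k hk
        rcases List.mem_cons.mp hk with h1 | h1
        · subst h1; exact h
        · exact hall k h1
      · intro hall k hk; exact hall k (List.mem_cons_of_mem _ hk)
    · rw [Bool.not_eq_true] at h
      rw [h, pvOuterA_false]
      simp only [Bool.false_eq_true, false_iff]
      push Not
      refine ⟨i, by simp, ?_⟩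
      simp only [List.getD_eq_getElem?_getD] at h
      simp [h]

-- A's flag equals the pairwise-far predicate
theorem pvFlagA_iff (temp : List (Int × Int)) :
    pvOuterA temp (List.range temp.length) true = true ↔ temp.Pairwise pvFar := by
  rw [pvOuterA_iff]
  rw [List.pairwise_iff_getElem]
  constructor
  · intro hall i j hi hj hij
    have h := (pvInnerA_iff _ _ _).mp (hall i (List.mem_range.mpr (by omega)))
    have hjmem : j ∈ List.range' (i + 1) (temp.length - (i + 1)) := by
      rw [List.mem_range']
      exact ⟨j - (i + 1), by omega, by omega⟩
    have := h j hjmem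
    simp only [measureMinDistance, List.getD_eq_getElem?_getD, List.getElem?_eq_getElem hi,
      List.getElem?_eq_getElem hj, Option.getD_some, pvFar, not_le] at this ⊢
    omega
  · intro hpf i hi
    rw [List.mem_range] at hi
    rw [pvInnerA_iff]
    intro j hj
    rw [List.mem_range'] at hj
    obtain ⟨k, hk, rfl⟩ := hj
    simp only [one_mul] at *
    have hjlt : i + 1 + k < temp.length := by omega
    have := hpf i (i + 1 + k) hi hjlt (by omega)
    simp only [measureMinDistance, List.getD_eq_getElem?_getD, List.getElem?_eq_getElem hi,
      List.getElem?_eq_getElem hjlt, Option.getD_some, pvFar, not_le] at this ⊢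
    omega

-- B's scan from the empty set equals the same predicate
theorem pvFlagB_iff (temp : List (Int × Int)) :
    pvScanB PySem.Set.empty temp = true ↔ temp.Pairwise pvFar := by
  rw [pvScanB_iff]
  constructor
  · exact fun h => h.1
  · intro h
    refine ⟨h, ?_⟩
    intro p _ q hq
    simp [PySem.Set.empty] at hq

theorem pvFlag_eq (temp : List (Int × Int)) :
    pvOuterA temp (List.range temp.length) true = pvScanB PySem.Set.empty temp := by
  by_cases h : temp.Pairwise pvFar
  · rw [(pvFlagA_iff temp).mpr h, (pvFlagB_iff temp).mpr h]
  · have hA := (pvFlagA_iff temp).not.mpr h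
    have hB := (pvFlagB_iff temp).not.mpr h
    rw [Bool.not_eq_true] at hA hB
    rw [hA, hB]

-- ===== VERDICT (by name: the statement is the Claim_ definition above) =====
theorem convert2pair_spec : Claim_equal_convert2pair := by
  intro num_list w _ _
  unfold Spec_convert2pair convert2pair convert2pair_alt
  congr 1
  funext result nums
  simp only [pvFlag_eq]
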